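-- pv_equiv track=rewrite | github.com/pypi-data/pypi-mirror-35 | packages/prawframe/prawframe-0.0.1-py3-none-any.whl/prawframe/obfuscation.py | circular_add
-- ===== SOURCE A (Python) =====
-- def circular_add(start, amount, rng=(30, 126)):
--     output = start + amount
--     if output > rng[1]:
--         output -= rng[1]
--         output += rng[0] - 1
--         if output > rng[1]:
--             output = circular_add(rng[1], output - rng[1], rng=rng)
--
--     return output
-- ===== SOURCE B (Python) =====
-- def circular_add(start, amount, rng=(30, 126)):
--     lo, hi = rng[0], rng[1]
--     output = start + amount
--     if output <= hi:
--         return output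
--     return lo + (output - lo) % (hi - lo + 1)
-- ===== Notes on version B (the rewrite author's own statement) =====
-- stated objective: faster
-- what changed: A reduces start+amount into the range by repeatedly subtracting the span hi-lo+1 via tail recursion (one call per span subtracted); B computes the result in O(1) as lo + (output - lo) % (hi - lo + 1) when the sum exceeds hi.
import Mathlib
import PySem

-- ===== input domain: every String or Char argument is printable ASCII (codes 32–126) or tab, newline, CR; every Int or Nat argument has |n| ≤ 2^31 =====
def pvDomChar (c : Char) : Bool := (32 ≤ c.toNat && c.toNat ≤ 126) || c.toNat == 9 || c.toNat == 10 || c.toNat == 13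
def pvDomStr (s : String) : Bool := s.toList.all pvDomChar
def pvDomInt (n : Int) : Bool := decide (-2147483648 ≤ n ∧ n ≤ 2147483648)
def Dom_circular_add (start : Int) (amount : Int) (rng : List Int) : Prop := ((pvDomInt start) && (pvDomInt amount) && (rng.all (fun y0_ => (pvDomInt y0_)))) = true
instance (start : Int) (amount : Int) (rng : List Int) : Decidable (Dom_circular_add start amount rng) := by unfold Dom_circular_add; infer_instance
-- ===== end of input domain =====

-- B replaces A's repeated span-subtraction recursion by the O(1) closed-form modular reduction
-- lo + (output - lo) % (hi - lo + 1); return-value equivalence on all inputs where A terminates.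


-- ===== PORT A =====
-- A's self-call 'circular_add(rng[1], output - rng[1], rng)' only re-reads the same rng[0]/rng[1],
-- so it is transcribed as this helper recursing on (output, lo, hi); the 'lo ≤ hi' conjunct in the
-- dite is ONLY a totality guard: when it fails Python recurses forever (excluded by Pre_).
def circAuxA (output lo hi : Int) : Int :=
  if output > hi then
    let o2 := output - hi + (lo - 1)
    if _h : o2 > hi ∧ lo ≤ hi then
      circAuxA (hi + (o2 - hi)) lo hi
    else o2
  else output
termination_by (output - hi).toNat
decreasing_by
  simp only [gt_iff_lt] at *
  omega

def circular_add (start : Int) (amount : Int) (rng : List Int) : Int :=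
  match PySem.List.pyGet? rng 0, PySem.List.pyGet? rng 1 with
  | some lo, some hi => circAuxA (start + amount) lo hi
  | _, _ => 0   -- IndexError in Python (len(rng) < 2); excluded by Pre_

-- ===== PORT B =====
def circular_add_alt (start : Int) (amount : Int) (rng : List Int) : Int :=
  match PySem.List.pyGet? rng 0 with
  | none => 0   -- IndexError in Python (rng empty); excluded by Pre_
  | some lo =>
    match PySem.List.pyGet? rng 1 with
    | none => 0   -- IndexError in Python (len(rng) < 2); excluded by Pre_
    | some hi =>
      let output := start + amount
      if output ≤ hi then output
      else lo + PySem.Int.mod (output - lo) (hi - lo + 1)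

-- ===== PRECONDITION & SPEC =====
-- Pre_ excludes exactly where A does not return: len(rng) < 2 (IndexError on rng[1]) and the
-- inputs where lo > hi while the sum exceeds hi, on which A recurses forever (RecursionError).
def Pre_circular_add (start : Int) (amount : Int) (rng : List Int) : Prop :=
  2 ≤ rng.length ∧ (start + amount ≤ rng.getD 1 0 ∨ rng.getD 0 0 ≤ rng.getD 1 0)
instance (start : Int) (amount : Int) (rng : List Int) : Decidable (Pre_circular_add start amount rng) := by unfold Pre_circular_add; infer_instance
def pvWitness_circular_add : Int × Int × List Int := (100, 5000, [30, 126])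
def Spec_circular_add (start : Int) (amount : Int) (rng : List Int) (out : Int) : Prop := out = circular_add_alt start amount rng
instance (start : Int) (amount : Int) (rng : List Int) (out : Int) : Decidable (Spec_circular_add start amount rng out) := by unfold Spec_circular_add; infer_instance

-- ===== CLAIM (what is proved, stated in full; the proofs are below) =====
def Claim_equal_circular_add : Prop := ∀ (start : Int) (amount : Int) (rng : List Int), Dom_circular_add start amount rng → Pre_circular_add start amount rng → Spec_circular_add start amount rng (circular_add start amount rng)

-- ===== LEMMAS AND PROOFS =====
lemma circAuxA_closed (lo hi : Int) (hlh : lo ≤ hi) (output : Int) :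
    circAuxA output lo hi =
      if output ≤ hi then output
      else lo + PySem.Int.mod (output - lo) (hi - lo + 1) := by
  have hspan : (0:Int) < hi - lo + 1 := by omega
  suffices H : ∀ n : ℕ, ∀ output : Int, (output - hi).toNat ≤ n →
      circAuxA output lo hi =
        if output ≤ hi then output
        else lo + PySem.Int.mod (output - lo) (hi - lo + 1) from
    H (output - hi).toNat output le_rfl
  intro n
  induction n with
  | zero =>
    intro output h0
    rw [circAuxA]
    simp only [gt_iff_lt]
    rw [if_neg (by omega : ¬ hi < output), if_pos (by omega : output ≤ hi)]
  | succ n ih =>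
    intro output hle
    rw [circAuxA]
    simp only [gt_iff_lt]
    by_cases h1 : hi < output
    · rw [if_pos h1, if_neg (by omega : ¬ output ≤ hi)]
      by_cases h2 : hi < output - hi + (lo - 1) ∧ lo ≤ hi
      · -- recursive branch: the reduced value still exceeds hi
        obtain ⟨h2a, h2b⟩ := h2
        rw [dif_pos ⟨h2a, h2b⟩, ih (hi + (output - hi + (lo - 1) - hi)) (by omega),
            if_neg (by omega : ¬ hi + (output - hi + (lo - 1) - hi) ≤ hi)]
        have e : hi + (output - hi + (lo - 1) - hi) - lo = (output - lo) - (hi - lo + 1) := by ring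
        rw [PySem.Int.mod_eq_emod_of_pos hspan, PySem.Int.mod_eq_emod_of_pos hspan, e,
            Int.sub_emod_right]
      · -- exit branch: the reduced value landed inside the range
        rw [dif_neg h2]
        have ho2 : output - hi + (lo - 1) ≤ hi := by
          rcases not_and_or.mp h2 with h' | h'
          · omega
          · exact absurd hlh h'
        rw [PySem.Int.mod_eq_emod_of_pos hspan]
        have hval : (output - lo) % (hi - lo + 1) = output - hi + (lo - 1) - lo := by
          have e2 : output - lo = (output - hi + (lo - 1) - lo) + (hi - lo + 1) * 1 := by ring
          rw [e2, Int.add_mul_emod_self_left, Int.emod_eq_of_lt (by omega) (by omega)]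
        omega
    · -- no reduction needed
      rw [if_neg h1, if_pos (by omega : output ≤ hi)]

-- ===== VERDICT (by name: the statement is the Claim_ definition above) =====
theorem circular_add_spec : Claim_equal_circular_add := by
  intro start amount rng _ hpre
  obtain ⟨hlen, hcase⟩ := hpre
  unfold Spec_circular_add circular_add circular_add_alt
  match rng, hlen with
  | a :: b :: rest, _ =>
    simp only [List.getD, List.getElem?_cons_zero, List.getElem?_cons_succ, Option.getD_some] at hcase
    have h0 : PySem.List.pyGet? (a :: b :: rest) 0 = some a := by
      rw [show (0:Int) = ((0:Nat):Int) by norm_num, PySem.List.pyGet?_natCast]; simp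
    have h1 : PySem.List.pyGet? (a :: b :: rest) 1 = some b := by
      rw [show (1:Int) = ((1:Nat):Int) by norm_num, PySem.List.pyGet?_natCast]; simp
    simp only [h0, h1]
    rcases hcase with h | h
    · rw [circAuxA]
      simp only [gt_iff_lt, if_neg (by omega : ¬ b < start + amount)]
      simp [h]
    · rw [circAuxA_closed a b h]
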